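-- pv_equiv track=rewrite | github.com/abhi1345/deep-q-rank | util/helper_functions.py | format_bias_output
-- ===== SOURCE A (Python) =====
-- def format_bias_output(data):
--
--     output_lines = []
--     for i, line in enumerate(data):
--         output_lines.append(line)
--         if (i + 1) % 2 == 0 and i + 1 < len(data):
--             output_lines.append('-' * 45)
--
--     formatted_output = '\n'.join(output_lines)
--     return formatted_output
-- ===== SOURCE B (Python) =====
-- def format_bias_output(data):
--     chunks = [data[i:i + 2] for i in range(0, len(data), 2)]
--     separator = '\n' + '-' * 45 + '\n'
--     return separator.join('\n'.join(chunk) for chunk in chunks)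
-- ===== Notes on version B (the rewrite author's own statement) =====
-- stated objective: alternative
-- what changed: Replaces A's per-element loop with enumerate, modulo-2 parity test and length lookahead by slicing the list into pairs, rendering each pair with '\n'.join and joining the rendered pairs with the separator string, so the separator placement falls out of the join instead of an index test.
import Mathlib
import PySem

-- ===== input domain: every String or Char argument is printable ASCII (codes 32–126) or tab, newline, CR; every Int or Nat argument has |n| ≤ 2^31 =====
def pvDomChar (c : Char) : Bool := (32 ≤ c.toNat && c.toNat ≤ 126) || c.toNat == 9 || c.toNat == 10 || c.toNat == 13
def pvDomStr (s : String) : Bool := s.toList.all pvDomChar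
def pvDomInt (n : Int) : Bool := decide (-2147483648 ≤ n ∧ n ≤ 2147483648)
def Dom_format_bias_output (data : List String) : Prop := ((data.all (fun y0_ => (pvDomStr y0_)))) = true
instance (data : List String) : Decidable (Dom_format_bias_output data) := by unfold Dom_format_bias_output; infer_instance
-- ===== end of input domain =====

-- B renders the list chunk-by-chunk (pairs sliced out, joined, then joined with the
-- separator) instead of A's per-element loop with a parity and lookahead test. Alternative
-- decomposition, same cost; return values proved equal on all inputs.

-- ===== PORT A =====
def format_bias_output (data : List String) : String :=
  let output_lines :=
    (PySem.List.enumerate data).foldl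
      (fun (acc : List String) (p : Int × String) =>
        let acc' := acc ++ [p.2]
        if PySem.Int.mod (p.1 + 1) 2 == 0 && decide (p.1 + 1 < (data.length : Int)) then
          acc' ++ [String.ofList (PySem.List.pyRepeat ['-'] 45)]
        else acc')
      []
  PySem.Str.join "\n" output_lines

-- ===== PORT B =====
def format_bias_output_alt (data : List String) : String :=
  let chunks := (PySem.List.pyRange 0 (data.length : Int) 2).map
      (fun i => PySem.List.slice data (some i) (some (i + 2)))
  let separator := "\n" ++ String.ofList (PySem.List.pyRepeat ['-'] 45) ++ "\n"
  PySem.Str.join separator (chunks.map (fun chunk => PySem.Str.join "\n" chunk))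

-- ===== PRECONDITION & SPEC =====
def Spec_format_bias_output (data : List String) (out : String) : Prop := out = format_bias_output_alt data
instance (data : List String) (out : String) : Decidable (Spec_format_bias_output data out) := by unfold Spec_format_bias_output; infer_instance

-- ===== CLAIM (what is proved, stated in full; the proofs are below) =====
def Claim_equal_format_bias_output : Prop := ∀ (data : List String), Dom_format_bias_output data → Spec_format_bias_output data (format_bias_output data)

-- ===== LEMMAS AND PROOFS =====

-- the dash separator line, as a string
def pvDashS : String := String.ofList (PySem.List.pyRepeat ['-'] 45)

-- A's output_lines, written as structural recursion over the remaining suffix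
def pvLinesA (n : Int) : List String → Int → List String
  | [], _ => []
  | x :: xs, s =>
      x :: (if PySem.Int.mod (s + 1) 2 == 0 && decide (s + 1 < n) then
              pvDashS :: pvLinesA n xs (s + 1)
            else pvLinesA n xs (s + 1))

theorem pvFoldA (n : Int) (xs : List String) : ∀ (s : Int) (acc : List String),
    (PySem.List.enumerate xs s).foldl
      (fun (acc : List String) (p : Int × String) =>
        let acc' := acc ++ [p.2]
        if PySem.Int.mod (p.1 + 1) 2 == 0 && decide (p.1 + 1 < n) then
          acc' ++ [String.ofList (PySem.List.pyRepeat ['-'] 45)]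
        else acc')
      acc
    = acc ++ pvLinesA n xs s := by
  induction xs with
  | nil => intro s acc; simp [PySem.List.enumerate, pvLinesA]
  | cons x xs ih =>
      intro s acc
      rw [PySem.List.enumerate_cons]
      simp only [List.foldl_cons, ih]
      have e : pvLinesA n (x :: xs) s
          = x :: (if PySem.Int.mod (s + 1) 2 == 0 && decide (s + 1 < n) then
                    pvDashS :: pvLinesA n xs (s + 1)
                  else pvLinesA n xs (s + 1)) := rfl
      rw [e]
      split_ifs with h <;> simp [pvDashS]

-- two-step induction principle on lists
theorem pvPairInd {α : Type} {P : List α → Prop} (h0 : P []) (h1 : ∀ x, P [x])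
    (h2 : ∀ x y rest, P rest → P (x :: y :: rest)) : ∀ xs, P xs
  | [] => h0
  | [x] => h1 x
  | x :: y :: rest => h2 x y rest (pvPairInd h0 h1 h2 rest)

theorem pvRange_two_nil (a b : Int) (h : b ≤ a) : PySem.List.pyRange a b 2 = [] := by
  rw [PySem.List.pyRange_of_pos a b (by norm_num)]
  simp [show ¬ a < b by omega]

theorem pvRange_two_cons (a b : Int) (h : a < b) :
    PySem.List.pyRange a b 2 = a :: PySem.List.pyRange (a + 2) b 2 := by
  rw [PySem.List.pyRange_of_pos a b (by norm_num),
      PySem.List.pyRange_of_pos (a + 2) b (by norm_num)]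
  by_cases h2 : a + 2 < b
  · simp only [if_pos h, if_pos h2]
    have e : ((b - a + 2 - 1) / 2).toNat = ((b - (a + 2) + 2 - 1) / 2).toNat + 1 := by omega
    rw [e, List.range_succ_eq_map, List.map_cons, List.map_map]
    refine congrArg₂ _ (by simp) ?_
    refine List.map_congr_left ?_
    intro k _
    simp [Function.comp]
    ring
  · simp only [if_pos h, if_neg h2]
    have e : ((b - a + 2 - 1) / 2).toNat = 1 := by omega
    rw [e]
    simp

theorem pvMod2_odd (s : Nat) (h : s % 2 = 0) :
    (PySem.Int.mod ((s : Int) + 1) 2 == 0) = false := by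
  simp
  omega

theorem pvMod2_even (s : Nat) (h : s % 2 = 0) :
    (PySem.Int.mod ((s : Int) + 2) 2 == 0) = true := by
  simp
  omega

theorem pvStrJoin_nil (sep : String) : PySem.Str.join sep [] = "" := by
  rw [← String.toList_inj]
  simp [PySem.Str.toList_join, PySem.Chars.join_nil]

theorem pvStrJoin_singleton (sep a : String) : PySem.Str.join sep [a] = a := by
  rw [← String.toList_inj]
  simp [PySem.Str.toList_join, PySem.Chars.join_singleton]

theorem pvStrJoin_cons_cons (sep a b : String) (ls : List String) :
    PySem.Str.join sep (a :: b :: ls) = a ++ sep ++ PySem.Str.join sep (b :: ls) := by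
  rw [← String.toList_inj]
  simp [PySem.Str.toList_join, PySem.Chars.join_cons_cons, String.toList_append]

theorem pvLinesA_cons (n : Int) (x : String) (xs : List String) (s : Int) :
    pvLinesA n (x :: xs) s
      = x :: (if PySem.Int.mod (s + 1) 2 == 0 && decide (s + 1 < n) then
                pvDashS :: pvLinesA n xs (s + 1)
              else pvLinesA n xs (s + 1)) := rfl

-- main: from an even position s on, A's joined lines equal B's joined chunks
theorem pvMain (data : List String) : ∀ (xs : List String), ∀ (s : Nat),
    data.drop s = xs → data.length = s + xs.length → s % 2 = 0 →
    PySem.Str.join "\n" (pvLinesA (data.length : Int) xs (s : Int)) =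
    PySem.Str.join ("\n" ++ pvDashS ++ "\n")
      ((PySem.List.pyRange (s : Int) (data.length : Int) 2).map
        (fun i => PySem.Str.join "\n" (PySem.List.slice data (some i) (some (i + 2))))) := by
  refine pvPairInd ?_ ?_ ?_
  · -- xs = []
    intro s h1 h2 h3
    simp only [List.length_nil, Nat.add_zero] at h2
    rw [pvRange_two_nil _ _ (by omega)]
    simp [pvLinesA, pvStrJoin_nil]
  · -- xs = [x]
    intro x s h1 h2 h3
    simp only [List.length_singleton] at h2
    have hr : PySem.List.pyRange (s : Int) (data.length : Int) 2 = [(s : Int)] := by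
      rw [pvRange_two_cons _ _ (by omega), pvRange_two_nil _ _ (by omega)]
    have hs : PySem.List.slice data (some (s : Int)) (some ((s : Int) + 2)) = [x] := by
      rw [show ((s : Int) + 2) = ((s : Int) + ((2 : Nat) : Int)) by norm_num,
          PySem.List.slice_natCast_add, h1]
      simp
    have hc1 : (PySem.Int.mod ((s : Int) + 1) 2 == 0 && decide ((s : Int) + 1 < (data.length : Int))) = false := by
      rw [pvMod2_odd s h3]; rfl
    have hl : pvLinesA (data.length : Int) [x] (s : Int) = [x] := by
      rw [pvLinesA_cons, if_neg (fun hh => Bool.false_ne_true (hc1 ▸ hh))]; rfl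
    rw [hr, List.map_cons, List.map_nil, hs, hl, pvStrJoin_singleton, pvStrJoin_singleton]
  · -- xs = x :: y :: rest
    intro x y rest IH s h1 h2 h3
    simp only [List.length_cons] at h2
    have hd2 : data.drop (s + 2) = rest := by
      have h' := congrArg (List.drop 2) h1
      rw [List.drop_drop] at h'
      simpa [Nat.add_comm] using h'
    have hslice : PySem.List.slice data (some (s : Int)) (some ((s : Int) + 2)) = [x, y] := by
      rw [show ((s : Int) + 2) = ((s : Int) + ((2 : Nat) : Int)) by norm_num,
          PySem.List.slice_natCast_add, h1]
      simp
    have hc1 : (PySem.Int.mod ((s : Int) + 1) 2 == 0 && decide ((s : Int) + 1 < (data.length : Int))) = false := by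
      rw [pvMod2_odd s h3]; rfl
    have c2 : ((s : Int) + 1 + 1) = ((s : Int) + 2) := by ring
    rcases rest with _ | ⟨r, rs⟩
    · -- rest = []
      simp only [List.length_nil] at h2
      have hr : PySem.List.pyRange (s : Int) (data.length : Int) 2 = [(s : Int)] := by
        rw [pvRange_two_cons _ _ (by omega), pvRange_two_nil _ _ (by omega)]
      have hlt : ¬ ((s : Int) + 1 + 1 < (data.length : Int)) := by omega
      have hc2 : (PySem.Int.mod ((s : Int) + 1 + 1) 2 == 0 && decide ((s : Int) + 1 + 1 < (data.length : Int))) = false := by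
        simp [hlt]
      have hl : pvLinesA (data.length : Int) [x, y] (s : Int) = [x, y] := by
        rw [pvLinesA_cons, if_neg (fun hh => Bool.false_ne_true (hc1 ▸ hh)),
            pvLinesA_cons, if_neg (fun hh => Bool.false_ne_true (hc2 ▸ hh))]
        rfl
      rw [hr, List.map_cons, List.map_nil, hslice, hl]
      rw [pvStrJoin_singleton]
    · -- rest = r :: rs, nonempty
      have hlt2 : (s : Int) + 2 < (data.length : Int) := by
        simp only [List.length_cons] at h2; omega
      have hr : PySem.List.pyRange (s : Int) (data.length : Int) 2
          = (s : Int) :: PySem.List.pyRange ((s : Int) + 2) (data.length : Int) 2 :=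
        pvRange_two_cons _ _ (by omega)
      have hr2 : PySem.List.pyRange ((s : Int) + 2) (data.length : Int) 2
          = ((s : Int) + 2) :: PySem.List.pyRange ((s : Int) + 2 + 2) (data.length : Int) 2 :=
        pvRange_two_cons _ _ hlt2
      have IH' := IH (s + 2) hd2 (by simp only [List.length_cons] at h2 ⊢; omega) (by omega)
      rw [show (((s + 2 : Nat)) : Int) = (s : Int) + 2 by omega] at IH'
      have hc2 : (PySem.Int.mod ((s : Int) + 1 + 1) 2 == 0 && decide ((s : Int) + 1 + 1 < (data.length : Int))) = true := by
        rw [c2, pvMod2_even s h3]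
        simp [hlt2]
      rw [pvLinesA_cons, pvLinesA_cons,
          if_neg (fun hh => Bool.false_ne_true (hc1 ▸ hh)),
          if_pos hc2, c2]
      rw [pvLinesA_cons] at IH' ⊢
      rw [hr, List.map_cons]
      rw [hr2, List.map_cons] at IH' ⊢
      rw [pvStrJoin_cons_cons, pvStrJoin_cons_cons, pvStrJoin_cons_cons, pvStrJoin_cons_cons]
      rw [← IH']
      simp only [hslice]
      rw [pvStrJoin_cons_cons, pvStrJoin_singleton]
      rw [← String.toList_inj]
      simp [String.toList_append]

-- ===== VERDICT (by name: the statement is the Claim_ definition above) =====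
theorem format_bias_output_spec : Claim_equal_format_bias_output := by
  intro data _
  unfold Spec_format_bias_output format_bias_output format_bias_output_alt
  simp only []
  rw [pvFoldA (data.length : Int) data 0 []]
  have h := pvMain data data 0 (by simp) (by simp) (by simp)
  simp only [Nat.cast_zero] at h
  simpa [pvDashS, List.map_map, Function.comp] using h
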